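-- pv_equiv track=rewrite | github.com/Eqpoqpe/openpeap | _peapods.py | _sepatch
-- ===== SOURCE A (Python) =====
-- def _sepatch(peapod) -> dict or tuple:
--     _isize = len(peapod) - 1 # pods index
--     _csize = len(peapod[0]) # cpy_func index
--     patch_pod = []
--     for lo_val in range(_csize):
--         if (lo_val > len(peapod[_isize]) - 1 or peapod[_isize][lo_val] == None):
--             in_lo = _isize
--             while (in_lo >= 0):
--                 if (lo_val > len(peapod[in_lo]) - 1 or peapod[in_lo][lo_val] == None):
--                     in_lo -= 1
--                 else:
--                     patch_pod.append(peapod[in_lo][lo_val])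
--                     in_lo = -1 # stop while loop
--         else:   patch_pod.append(peapod[_isize][lo_val])
--     return patch_pod
-- ===== SOURCE B (Python) =====
-- def _sepatch(peapod) -> dict or tuple:
--     # Single row-major forward pass: later rows overwrite, so last[col] ends as
--     # the bottom-most non-None value of column col.
--     _csize = len(peapod[0])
--     last = [None] * _csize
--     for row in peapod:
--         last = [row[col] if col < len(row) and row[col] is not None else last[col]
--                 for col in range(_csize)]
--     return [v for v in last if v is not None]
-- ===== Notes on version B (the rewrite author's own statement) =====
-- stated objective: alternative
-- what changed: Replaced A's per-column bottom-up search loop (with early exit) by a single row-major forward pass that rebuilds a per-column 'last seen non-None' table with overwrite-wins, then emits the set columns in order.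
import Mathlib
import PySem

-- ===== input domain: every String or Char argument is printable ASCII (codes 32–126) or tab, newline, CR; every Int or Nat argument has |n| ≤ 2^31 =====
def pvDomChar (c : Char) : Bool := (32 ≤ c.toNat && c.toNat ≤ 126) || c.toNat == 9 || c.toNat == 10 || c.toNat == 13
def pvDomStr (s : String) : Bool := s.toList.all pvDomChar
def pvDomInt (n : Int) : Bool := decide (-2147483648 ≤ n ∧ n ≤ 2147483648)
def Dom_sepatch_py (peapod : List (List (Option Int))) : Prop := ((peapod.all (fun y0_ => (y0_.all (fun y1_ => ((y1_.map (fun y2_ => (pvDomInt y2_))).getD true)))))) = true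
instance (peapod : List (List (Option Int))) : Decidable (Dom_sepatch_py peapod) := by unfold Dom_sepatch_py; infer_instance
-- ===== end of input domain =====

-- B replaces A's per-column bottom-up search by a single row-major forward pass with
-- overwrite-wins (objective: alternative decomposition, same asymptotic cost).

-- ===== PORT A =====
-- condition 'lo_val > len(row) - 1 or row[lo_val] == None' (access is guarded, so getD is exact)
def pvAMissing (row : List (Option Int)) (lo : Nat) : Bool :=
  decide ((lo : Int) > (row.length : Int) - 1) || (row.getD lo none == none)

-- the 'while (in_lo >= 0)' loop, descending on the row index
def pvAWhile (peapod : List (List (Option Int))) (lo : Nat) : Nat → Option Int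
  | 0 =>
    if pvAMissing (peapod.getD 0 []) lo then none
    else (peapod.getD 0 []).getD lo none
  | i + 1 =>
    if pvAMissing (peapod.getD (i + 1) []) lo then pvAWhile peapod lo i
    else (peapod.getD (i + 1) []).getD lo none

def sepatch_py (peapod : List (List (Option Int))) : List Int :=
  match peapod with
  | [] => []  -- Python raises IndexError on peapod[0]; excluded by Pre_sepatch_py
  | row0 :: rest =>
    let pod := row0 :: rest
    let isize := pod.length - 1
    let lastRow := pod.getD isize []
    (List.range row0.length).foldl (fun acc lo =>
      if pvAMissing lastRow lo then
        match pvAWhile pod lo isize with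
        | some v => acc ++ [v]
        | none => acc
      else acc ++ [(lastRow.getD lo none).getD 0]) []

-- ===== PORT B =====
-- one comprehension step of Source B: new last, overwriting where the row has a value
def pvBUpdate (last row : List (Option Int)) : List (Option Int) :=
  (List.range last.length).map (fun col =>
    if decide (col < row.length) && (row.getD col none != none)
    then row.getD col none else last.getD col none)

def sepatch_py_alt (peapod : List (List (Option Int))) : List Int :=
  match peapod with
  | [] => []  -- Python raises IndexError on peapod[0]; excluded by Pre_sepatch_py
  | row0 :: rest =>
    -- '[v for v in last if v is not None]' = filterMap id
    ((row0 :: rest).foldl pvBUpdate (List.replicate row0.length none)).filterMap id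

-- ===== PRECONDITION & SPEC =====
-- Pre_ excludes only the empty grid, on which Python A raises IndexError (peapod[0]).
def Pre_sepatch_py (peapod : List (List (Option Int))) : Prop := peapod ≠ []
instance (peapod : List (List (Option Int))) : Decidable (Pre_sepatch_py peapod) := by unfold Pre_sepatch_py; infer_instance
def pvWitness_sepatch_py : List (List (Option Int)) := [[some 1, none], [none, some 2]]

def Spec_sepatch_py (peapod : List (List (Option Int))) (out : List Int) : Prop := out = sepatch_py_alt peapod
instance (peapod : List (List (Option Int))) (out : List Int) : Decidable (Spec_sepatch_py peapod out) := by unfold Spec_sepatch_py; infer_instance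

-- ===== CLAIM (what is proved, stated in full; the proofs are below) =====
def Claim_equal_sepatch_py : Prop := ∀ (peapod : List (List (Option Int))), Dom_sepatch_py peapod → Pre_sepatch_py peapod → Spec_sepatch_py peapod (sepatch_py peapod)

-- ===== LEMMAS AND PROOFS =====

-- common per-column characterization: forward overwrite-wins fold
def pvStep (lo : Nat) (o : Option Int) (row : List (Option Int)) : Option Int :=
  match row.getD lo none with
  | some v => some v
  | none => o

def pvG (lo : Nat) (l : List (List (Option Int))) : Option Int := l.foldl (pvStep lo) none

theorem pvAMissing_eq (row : List (Option Int)) (lo : Nat) :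
    pvAMissing row lo = (row.getD lo none == none) := by
  unfold pvAMissing
  by_cases hl : lo < row.length
  · have h1 : ¬((lo : Int) > (row.length : Int) - 1) := by omega
    simp [h1]
  · have h1 : ((lo : Int) > (row.length : Int) - 1) := by omega
    have h2 : row.getD lo none = none := List.getD_eq_default _ _ (by omega)
    rw [h2]
    simp [h1]

theorem pvG_append (lo : Nat) (xs : List (List (Option Int))) (r : List (Option Int)) :
    pvG lo (xs ++ [r]) = pvStep lo (pvG lo xs) r := by
  simp [pvG, List.foldl_append]

theorem take_succ_getD (l : List (List (Option Int))) (i : Nat) (h : i < l.length) :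
    l.take (i + 1) = l.take i ++ [l.getD i []] := by
  rw [List.take_add_one]
  congr 1
  rw [List.getD_eq_getElem?_getD, List.getElem?_eq_getElem h]
  rfl

theorem pvAWhile_eq_pvG (peapod : List (List (Option Int))) (lo i : Nat) (h : i < peapod.length) :
    pvAWhile peapod lo i = pvG lo (peapod.take (i + 1)) := by
  induction i with
  | zero =>
    rw [take_succ_getD peapod 0 h, pvAWhile, pvAMissing_eq]
    simp only [List.take_zero, List.nil_append, pvG, List.foldl_cons, List.foldl_nil, pvStep]
    cases hc : (peapod.getD 0 []).getD lo none with
    | none => simp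
    | some v => simp
  | succ i ih =>
    rw [take_succ_getD peapod (i + 1) h, pvG_append, pvAWhile, pvAMissing_eq]
    simp only [pvStep]
    cases hc : (peapod.getD (i + 1) []).getD lo none with
    | none => simp [ih (by omega)]
    | some v => simp

theorem foldl_opt_append (X : Nat → Option Int) (l : List Nat) (acc : List Int) :
    l.foldl (fun a lo => match X lo with | some v => a ++ [v] | none => a) acc
      = acc ++ l.filterMap X := by
  induction l generalizing acc with
  | nil => simp
  | cons x xs ih =>
    cases hx : X x <;> simp [List.foldl_cons, hx, ih]

-- A equals the per-column characterization
theorem sepatch_py_char (row0 : List (Option Int)) (rest : List (List (Option Int))) :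
    sepatch_py (row0 :: rest) = (List.range row0.length).filterMap (fun lo => pvG lo (row0 :: rest)) := by
  show (List.range row0.length).foldl _ [] = _
  have hbody : ∀ (acc : List Int) (lo : Nat),
      (fun acc lo =>
        if pvAMissing ((row0 :: rest).getD ((row0 :: rest).length - 1) []) lo then
          match pvAWhile (row0 :: rest) lo ((row0 :: rest).length - 1) with
          | some v => acc ++ [v]
          | none => acc
        else acc ++ [(((row0 :: rest).getD ((row0 :: rest).length - 1) []).getD lo none).getD 0]) acc lo
      = (fun acc lo => match pvG lo (row0 :: rest) with | some v => acc ++ [v] | none => acc) acc lo := by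
    intro acc lo
    have hlen : (row0 :: rest).length - 1 < (row0 :: rest).length := by simp
    have htake : (row0 :: rest).take ((row0 :: rest).length - 1 + 1) = row0 :: rest := by
      rw [Nat.sub_add_cancel (by simp)]
      exact List.take_length
    have hA : pvAWhile (row0 :: rest) lo ((row0 :: rest).length - 1) = pvG lo (row0 :: rest) := by
      rw [pvAWhile_eq_pvG _ _ _ hlen, htake]
    by_cases hm : pvAMissing ((row0 :: rest).getD ((row0 :: rest).length - 1) []) lo
    · simp only [hm, if_true, hA]
    · -- bottom cell present: both sides append it
      have hc : ((row0 :: rest).getD ((row0 :: rest).length - 1) []).getD lo none ≠ none := by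
        rw [pvAMissing_eq] at hm; simpa using hm
      obtain ⟨v, hv⟩ := Option.ne_none_iff_exists'.mp hc
      have hG : pvG lo (row0 :: rest) = some v := by
        rw [← htake, take_succ_getD _ _ hlen, pvG_append, pvStep, hv]
      simp only [Bool.not_eq_true] at hm
      simp at hm hv
      simp [hm, hv, hG]
  rw [funext fun acc => funext fun lo => hbody acc lo]
  exact foldl_opt_append _ _ []

theorem getD_map_range' (n i : Nat) (h : Nat → Option Int) (hi : i < n) :
    ((List.range n).map h).getD i none = h i := by
  rw [List.getD_eq_getElem?_getD]
  simp [hi]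

theorem pvBUpdate_map_range (n : Nat) (h : Nat → Option Int) (row : List (Option Int)) :
    pvBUpdate ((List.range n).map h) row = (List.range n).map (fun lo => pvStep lo (h lo) row) := by
  unfold pvBUpdate
  rw [List.length_map, List.length_range]
  apply List.map_congr_left
  intro lo hlo
  rw [List.mem_range] at hlo
  rw [getD_map_range' n lo h hlo]
  simp only [pvStep]
  cases hc : row.getD lo none with
  | none => simp
  | some v =>
    have hlr : lo < row.length := by
      by_contra hge
      rw [List.getD_eq_default _ _ (by omega)] at hc
      simp at hc
    simp [hlr]

theorem foldl_pvBUpdate (l : List (List (Option Int))) (n : Nat) (h : Nat → Option Int) :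
    l.foldl pvBUpdate ((List.range n).map h)
      = (List.range n).map (fun lo => l.foldl (pvStep lo) (h lo)) := by
  induction l generalizing h with
  | nil => rfl
  | cons r rs ih =>
    rw [List.foldl_cons, pvBUpdate_map_range, ih]
    simp

theorem sepatch_py_alt_char (row0 : List (Option Int)) (rest : List (List (Option Int))) :
    sepatch_py_alt (row0 :: rest) = (List.range row0.length).filterMap (fun lo => pvG lo (row0 :: rest)) := by
  show (((row0 :: rest).foldl pvBUpdate (List.replicate row0.length none)).filterMap id) = _
  have hrep : (List.replicate row0.length (none : Option Int)) = (List.range row0.length).map (fun _ => none) := by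
    simp
  rw [hrep, foldl_pvBUpdate, List.filterMap_map]
  rfl

-- ===== VERDICT (by name: the statement is the Claim_ definition above) =====
theorem sepatch_py_spec : Claim_equal_sepatch_py := by
  intro peapod _ hpre
  unfold Spec_sepatch_py
  match peapod with
  | [] => exact absurd rfl hpre
  | row0 :: rest => rw [sepatch_py_char, sepatch_py_alt_char]
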